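-- pv_equiv track=rewrite | github.com/opinionmachine/mail-forward | mail_forwarder.py | parse_mail_messages
-- ===== SOURCE A (Python) =====
-- def parse_mail_messages(new_content):
--     """Parse new mail messages from the Unix mail spool format."""
--     messages = []
--     current_message = []
--
--     # Unix mail spool format: messages start with "From " line
--     for line in new_content.split('\n'):
--         # Check if this is a new message delimiter (starts with "From " and has email-like format)
--         if line.startswith('From ') and '@' in line and len(line.split()) >= 2:
--             if current_message:
--                 messages.append('\n'.join(current_message))
--             current_message = [line]
--         else:
--             if current_message or line.strip():  # Include content even if no From line yet
--                 current_message.append(line)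
--
--     if current_message:
--         messages.append('\n'.join(current_message))
--
--     return messages
-- ===== SOURCE B (Python) =====
-- def parse_mail_messages(new_content):
--     """Parse mail spool text back-to-front: walk the lines in reverse collecting the
--     current segment, flush a message whenever the segment's first line is a
--     'From ' delimiter, then clean leading blank lines off the leftover prefix."""
--     def is_delim(line):
--         return line.startswith('From ') and '@' in line and len(line.split()) >= 2
--
--     messages = []
--     prefix = []
--     for line in reversed(new_content.split('\n')):
--         prefix.insert(0, line)
--         if is_delim(line):
--             messages.insert(0, '\n'.join(prefix))
--             prefix = []
--     while prefix and not prefix[0].strip():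
--         prefix.pop(0)
--     if prefix:
--         messages.insert(0, '\n'.join(prefix))
--     return messages
-- ===== Notes on version B (the rewrite author's own statement) =====
-- stated objective: alternative
-- what changed: Replaces A's forward single-pass accumulator (flush-on-delimiter with inline blank-skipping state) by a reverse traversal that collects each delimiter-anchored segment right-to-left and flushes it when the delimiter line is reached, with the leading-blank trimming of the pre-delimiter prefix done as a separate post-step.
import Mathlib
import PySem

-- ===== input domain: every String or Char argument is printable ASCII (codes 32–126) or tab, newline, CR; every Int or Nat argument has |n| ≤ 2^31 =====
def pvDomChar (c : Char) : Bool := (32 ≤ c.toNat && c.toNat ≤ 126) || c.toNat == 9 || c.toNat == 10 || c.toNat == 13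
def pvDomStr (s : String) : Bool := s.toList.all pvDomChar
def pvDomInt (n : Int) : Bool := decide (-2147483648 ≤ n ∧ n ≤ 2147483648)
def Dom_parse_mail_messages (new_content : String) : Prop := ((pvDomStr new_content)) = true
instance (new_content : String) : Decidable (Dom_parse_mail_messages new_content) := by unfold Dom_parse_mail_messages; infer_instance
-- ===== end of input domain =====

-- B walks the lines in reverse, flushing a delimiter-anchored segment per 'From ' line,
-- then trims leading blanks off the leftover prefix (alternative decomposition, same cost).

-- ===== PORT A =====
-- shared delimiter test: line.startswith('From ') and '@' in line and len(line.split()) >= 2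
def pvDelim (line : String) : Bool :=
  PySem.Str.startswith line "From " && PySem.Str.isIn "@" line
    && decide (2 ≤ (PySem.Str.split₀ line).length)

def pvStepA (st : List String × List String) (line : String) : List String × List String :=
  if pvDelim line then
    ((if st.2.isEmpty then st.1 else st.1 ++ [PySem.Str.join "\n" st.2]), [line])
  else
    if !st.2.isEmpty || PySem.Str.strip line != "" then (st.1, st.2 ++ [line]) else st

def parse_mail_messages (new_content : String) : List String :=
  let lines := (PySem.Str.split? new_content "\n").getD []
  let st := lines.foldl pvStepA ([], [])
  if st.2.isEmpty then st.1 else st.1 ++ [PySem.Str.join "\n" st.2]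

-- ===== PORT B =====
def pvStepB (line : String) (st : List String × List String) : List String × List String :=
  let pre := line :: st.2
  if pvDelim line then (PySem.Str.join "\n" pre :: st.1, []) else (st.1, pre)

-- the 'while prefix and not prefix[0].strip(): prefix.pop(0)' loop
def pvDropBlank : List String → List String
  | [] => []
  | l :: ls => if PySem.Str.strip l == "" then pvDropBlank ls else l :: ls

def parse_mail_messages_alt (new_content : String) : List String :=
  let lines := (PySem.Str.split? new_content "\n").getD []
  let st := lines.foldr pvStepB ([], [])
  let p := pvDropBlank st.2
  if p.isEmpty then st.1 else PySem.Str.join "\n" p :: st.1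

-- ===== PRECONDITION & SPEC =====
def Spec_parse_mail_messages (new_content : String) (out : List String) : Prop := out = parse_mail_messages_alt new_content
instance (new_content : String) (out : List String) : Decidable (Spec_parse_mail_messages new_content out) := by unfold Spec_parse_mail_messages; infer_instance

-- ===== CLAIM (what is proved, stated in full; the proofs are below) =====
def Claim_equal_parse_mail_messages : Prop := ∀ (new_content : String), Dom_parse_mail_messages new_content → Spec_parse_mail_messages new_content (parse_mail_messages new_content)

-- ===== LEMMAS AND PROOFS =====

-- A's finalisation step
def pvFin (st : List String × List String) : List String :=
  if st.2.isEmpty then st.1 else st.1 ++ [PySem.Str.join "\n" st.2]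

-- chunks cur ls: the segments A produces from pending segment `cur` over remaining lines `ls`
def pvChunks (cur : List String) : List String → List (List String)
  | [] => [cur]
  | l :: ls => if pvDelim l then cur :: pvChunks [l] ls else pvChunks (cur ++ [l]) ls

-- segsR ls = (delimiter-anchored segments of ls, prefix of ls before the first delimiter)
def pvSegsR : List String → List (List String) × List String
  | [] => ([], [])
  | l :: ls =>
      if pvDelim l then ((l :: (pvSegsR ls).2) :: (pvSegsR ls).1, [])
      else ((pvSegsR ls).1, l :: (pvSegsR ls).2)

def pvE (ls : List String) : List String :=
  (if (pvDropBlank (pvSegsR ls).2).isEmpty then []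
   else [PySem.Str.join "\n" (pvDropBlank (pvSegsR ls).2)])
    ++ (pvSegsR ls).1.map (PySem.Str.join "\n")

theorem pvChunks_eq (ls : List String) : ∀ cur,
    pvChunks cur ls = (cur ++ (pvSegsR ls).2) :: (pvSegsR ls).1 := by
  induction ls with
  | nil => intro cur; simp [pvChunks, pvSegsR]
  | cons l ls ih =>
      intro cur
      by_cases h : pvDelim l = true <;>
        simp [pvChunks, pvSegsR, h, ih, List.append_assoc]

theorem pvFoldA_ne (ls : List String) : ∀ ms cur, cur ≠ [] →
    pvFin (ls.foldl pvStepA (ms, cur))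
      = ms ++ (pvChunks cur ls).map (PySem.Str.join "\n") := by
  induction ls with
  | nil =>
      intro ms cur h
      simp [pvFin, pvChunks, List.isEmpty_iff, h]
  | cons l ls ih =>
      intro ms cur h
      by_cases hd : pvDelim l = true
      · have hs : (l :: ls).foldl pvStepA (ms, cur)
            = ls.foldl pvStepA (ms ++ [PySem.Str.join "\n" cur], [l]) := by
          simp [pvStepA, hd, List.isEmpty_iff, h]
        rw [hs, ih (ms ++ [PySem.Str.join "\n" cur]) [l] (by simp)]
        simp [pvChunks, hd, List.append_assoc]
      · have hs : (l :: ls).foldl pvStepA (ms, cur)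
            = ls.foldl pvStepA (ms, cur ++ [l]) := by
          simp [pvStepA, hd, h]
        rw [hs, ih ms (cur ++ [l]) (by simp)]
        simp [pvChunks, hd]

theorem pvA_eq_E (ls : List String) :
    pvFin (ls.foldl pvStepA ([], [])) = pvE ls := by
  induction ls with
  | nil => simp [pvFin, pvE, pvSegsR, pvDropBlank]
  | cons l ls ih =>
      by_cases hd : pvDelim l = true
      · have hs : (l :: ls).foldl pvStepA ([], []) = ls.foldl pvStepA ([], [l]) := by
          simp [pvStepA, hd]
        rw [hs, pvFoldA_ne ls [] [l] (by simp), pvChunks_eq]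
        simp [pvE, pvSegsR, hd, pvDropBlank]
      · by_cases hb : (PySem.Str.strip l == "") = true
        · have hs : (l :: ls).foldl pvStepA ([], []) = ls.foldl pvStepA ([], []) := by
            simp [pvStepA, hd, bne, hb]
          rw [hs, ih]
          simp [pvE, pvSegsR, hd, pvDropBlank, hb]
        · have hs : (l :: ls).foldl pvStepA ([], []) = ls.foldl pvStepA ([], [l]) := by
            simp [pvStepA, hd, bne, hb]
          rw [hs, pvFoldA_ne ls [] [l] (by simp), pvChunks_eq]
          simp [pvE, pvSegsR, hd, pvDropBlank, hb]

theorem pvFoldB_eq (ls : List String) :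
    ls.foldr pvStepB ([], [])
      = ((pvSegsR ls).1.map (PySem.Str.join "\n"), (pvSegsR ls).2) := by
  induction ls with
  | nil => simp [pvSegsR]
  | cons l ls ih =>
      by_cases hd : pvDelim l = true <;>
        simp [pvStepB, pvSegsR, hd, ih]

theorem pvB_eq_E (ls : List String) :
    (let st := ls.foldr pvStepB ([], [])
     let p := pvDropBlank st.2
     if p.isEmpty then st.1 else PySem.Str.join "\n" p :: st.1) = pvE ls := by
  rw [pvFoldB_eq]
  by_cases h : (pvDropBlank (pvSegsR ls).2).isEmpty = true <;>
    simp [pvE, h]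

-- ===== VERDICT (by name: the statement is the Claim_ definition above) =====
theorem parse_mail_messages_spec : Claim_equal_parse_mail_messages := by
  intro s _
  show parse_mail_messages s = parse_mail_messages_alt s
  unfold parse_mail_messages parse_mail_messages_alt
  rw [show ∀ st : List String × List String,
        (if st.2.isEmpty then st.1 else st.1 ++ [PySem.Str.join "\n" st.2]) = pvFin st
      from fun _ => rfl]
  rw [pvA_eq_E, ← pvB_eq_E]
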